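-- pv_equiv track=rewrite | github.com/openclawgotchi/doc | src/bot/telegram.py | _ensure_tool_usage_in_code_block
-- ===== SOURCE A (Python) =====
-- def _ensure_tool_usage_in_code_block(text: str) -> str:
--     """
--     Ensure 'Tool usage' section is wrapped in code block.
--     If 'Tool usage' exists but not in a code block, wrap it.
--     """
--     if "Tool usage" not in text:
--         return text
--
--     lines = text.split("\n")
--     tool_start_idx = None
--     in_code_block = False
--
--     for i, line in enumerate(lines):
--         if "Tool usage" in line:
--             # Check if we're already in a code block
--             for j in range(i):
--                 if "```" in lines[j]:
--                     in_code_block = not in_code_block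
--             tool_start_idx = i
--             break
--
--     if tool_start_idx is not None and not in_code_block:
--         # Find where the tool usage section ends (empty line or end)
--         tool_end_idx = tool_start_idx + 1
--         while tool_end_idx < len(lines) and lines[tool_end_idx].strip():
--             tool_end_idx += 1
--
--         # Wrap the Tool usage section
--         before = lines[:tool_start_idx]
--         tool_section = lines[tool_start_idx:tool_end_idx]
--         after = lines[tool_end_idx:]
--
--         # Add code block markers
--         tool_section = ["```"] + tool_section + ["```"]
--
--         return "\n".join(before + tool_section + after)
--
--     return text
-- ===== SOURCE B (Python) =====
-- def _ensure_tool_usage_in_code_block(text: str) -> str: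
--     """Character-offset re-implementation: locate the first 'Tool usage'
--     occurrence with str.find, derive its line start with str.rfind, and splice
--     the ``` fences into the original string with slicing instead of splitting
--     the whole text into a line list and rejoining it."""
--     pos = text.find("Tool usage")
--     if pos == -1:
--         return text
--     start = text.rfind("\n", 0, pos) + 1
--     parity = False
--     for ln in text[:start].split("\n")[:-1]:
--         if "```" in ln:
--             parity = not parity
--     if parity:
--         return text
--     e = text.find("\n", start)
--     while e != -1:
--         nxt_end = text.find("\n", e + 1)
--         nxt = text[e + 1:nxt_end] if nxt_end != -1 else text[e + 1:]
--         if not nxt.strip():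
--             break
--         e = nxt_end
--     if e == -1:
--         e = len(text)
--     return text[:start] + "```\n" + text[start:e] + "\n```" + text[e:]
-- ===== Notes on version B (the rewrite author's own statement) =====
-- stated objective: alternative
-- what changed: B never builds a line list of the whole text: it locates the marker with str.find, derives the line start with str.rfind, walks to the section end by repeated str.find of newlines, and splices the fences into the original string with slicing (only the prefix before the marker line is split, for fence parity).
import Mathlib
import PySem

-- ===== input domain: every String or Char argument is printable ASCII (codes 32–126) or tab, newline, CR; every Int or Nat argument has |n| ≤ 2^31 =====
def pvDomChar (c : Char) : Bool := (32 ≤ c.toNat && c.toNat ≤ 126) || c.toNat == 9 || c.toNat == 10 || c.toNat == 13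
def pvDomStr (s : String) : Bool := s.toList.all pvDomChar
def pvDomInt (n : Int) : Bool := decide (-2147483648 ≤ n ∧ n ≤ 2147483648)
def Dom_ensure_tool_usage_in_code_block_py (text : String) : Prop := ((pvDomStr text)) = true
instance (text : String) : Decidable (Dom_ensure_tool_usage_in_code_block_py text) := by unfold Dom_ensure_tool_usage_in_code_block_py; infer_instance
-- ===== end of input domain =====

-- B avoids splitting the whole text into a line list: it works with character
-- offsets (find/rfind and slicing); same return value (alternative, not faster).

-- ===== PORT A =====
-- for i, line in enumerate(lines): if "Tool usage" in line: … break
def aFind : List (List Char) → Nat → Option Nat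
  | [], _ => none
  | l :: rest, i => if PySem.Chars.isIn "Tool usage".toList l then some i else aFind rest (i + 1)

-- while tool_end_idx < len(lines) and lines[tool_end_idx].strip(): tool_end_idx += 1
def aEnd : List (List Char) → Nat → Nat
  | [], k => k
  | l :: rest, k => if PySem.Chars.strip l = [] then k else aEnd rest (k + 1)

def ensure_tool_usage_in_code_block_py (text : String) : String :=
  if ¬ PySem.Str.isIn "Tool usage" text then text
  else
    let lines := (PySem.Chars.split? text.toList "\n".toList).getD []   -- sep ≠ "", never none
    match aFind lines 0 with
    | none => text
    | some i =>
      -- for j in range(i): if "```" in lines[j]: in_code_block = not in_code_block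
      let inCode := (lines.take i).foldl
        (fun b l => if PySem.Chars.isIn "```".toList l then !b else b) false
      if inCode then text
      else
        let e := aEnd (lines.drop (i + 1)) (i + 1)
        String.mk (PySem.Chars.join "\n".toList
          (lines.take i ++ ["```".toList] ++ (lines.drop i).take (e - i) ++ ["```".toList] ++ lines.drop e))

-- ===== PORT B =====
-- the 'while e != -1' loop of Source B, entered with e = index of a newline (≥ 0)
def bScan (cs : List Char) (e : Nat) : Int :=
  let nxtEnd := PySem.Chars.findFrom cs "\n".toList ((e : Int) + 1) none
  if nxtEnd = -1 then
    -- nxt = text[e+1:]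
    if PySem.Chars.strip (cs.drop (e + 1)) = [] then (e : Int) else -1
  else
    -- nxt = text[e+1:nxt_end]
    if _hnb : PySem.Chars.strip ((cs.take nxtEnd.toNat).drop (e + 1)) = [] then (e : Int)
    else bScan cs nxtEnd.toNat
termination_by cs.length - e
decreasing_by
  have hne : (cs.take nxtEnd.toNat).drop (e + 1) ≠ [] := by
    intro h; exact _hnb (by rw [h]; rfl)
  rw [ne_eq, List.drop_eq_nil_iff, not_le, List.length_take, lt_min_iff] at hne
  omega

def ensure_tool_usage_in_code_block_py_alt (text : String) : String :=
  let cs := text.toList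
  let pos := PySem.Chars.find cs "Tool usage".toList
  if pos = -1 then text
  else
    -- start = text.rfind("\n", 0, pos) + 1
    let start := (PySem.Chars.rfindFrom cs "\n".toList 0 (some pos) + 1).toNat
    -- for ln in text[:start].split("\n")[:-1]: if "```" in ln: parity = not parity
    let parity := ((PySem.Chars.splitOn (cs.take start) "\n".toList).dropLast).foldl
      (fun b ln => if PySem.Chars.isIn "```".toList ln then !b else b) false
    if parity then text
    else
      let e0 := PySem.Chars.findFrom cs "\n".toList (start : Int) none
      let e1 : Int := if e0 = -1 then -1 else bScan cs e0.toNat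
      let e : Nat := if e1 = -1 then cs.length else e1.toNat
      -- text[:start] + "```\n" + text[start:e] + "\n```" + text[e:]
      String.mk (cs.take start ++ "```\n".toList ++ (cs.drop start).take (e - start)
        ++ "\n```".toList ++ cs.drop e)

-- ===== PRECONDITION & SPEC =====
def Spec_ensure_tool_usage_in_code_block_py (text : String) (out : String) : Prop := out = ensure_tool_usage_in_code_block_py_alt text
instance (text : String) (out : String) : Decidable (Spec_ensure_tool_usage_in_code_block_py text out) := by unfold Spec_ensure_tool_usage_in_code_block_py; infer_instance

-- ===== CLAIM (what is proved, stated in full; the proofs are below) =====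
def Claim_equal_ensure_tool_usage_in_code_block_py : Prop := ∀ (text : String), Dom_ensure_tool_usage_in_code_block_py text → Spec_ensure_tool_usage_in_code_block_py text (ensure_tool_usage_in_code_block_py text)

-- ===== LEMMAS AND PROOFS =====

def J (ls : List (List Char)) : List Char := PySem.Chars.join ['\n'] ls
def Good (ls : List (List Char)) : Prop := ∀ l ∈ ls, '\n' ∉ l
def mySplit : List Char → List (List Char)
  | [] => [[]]
  | c :: t =>
    if c = '\n' then [] :: mySplit t
    else match mySplit t with
      | [] => [[c]]
      | l :: ls => (c :: l) :: ls

lemma mySplit_ne_nil (cs : List Char) : mySplit cs ≠ [] := by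
  cases cs with
  | nil => simp [mySplit]
  | cons c t =>
    simp only [mySplit]
    split
    · simp
    · split <;> simp

lemma J_cons {x : List Char} {t : List (List Char)} (h : t ≠ []) :
    J (x :: t) = x ++ '\n' :: J t := by
  cases t with
  | nil => exact absurd rfl h
  | cons y s => simp [J, PySem.Chars.join, List.intercalate]

lemma good_mySplit (cs : List Char) : Good (mySplit cs) := by
  induction cs with
  | nil => intro l hl; simp [mySplit] at hl; simp [hl]
  | cons c t ih =>
    intro l hl
    simp only [mySplit] at hl
    split at hl
    · rcases List.mem_cons.mp hl with h | h
      · simp [h]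
      · exact ih l h
    · rename_i hc
      rcases hmt : mySplit t with _ | ⟨l0, ls0⟩
      · exact absurd hmt (mySplit_ne_nil t)
      · rw [hmt] at hl
        rcases List.mem_cons.mp hl with h | h
        · subst h
          intro hmem
          rcases List.mem_cons.mp hmem with h | h
          · exact hc h.symm
          · exact ih l0 (by rw [hmt]; simp) h
        · exact ih l (by rw [hmt]; exact List.mem_cons_of_mem _ h)

lemma join_mySplit (cs : List Char) : J (mySplit cs) = cs := by
  induction cs with
  | nil => simp [mySplit, J, PySem.Chars.join, List.intercalate]
  | cons c t ih =>
    simp only [mySplit]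
    split
    · rename_i hc
      rw [J_cons (mySplit_ne_nil t), ih, hc]
      rfl
    · rcases hmt : mySplit t with _ | ⟨l0, ls0⟩
      · exact absurd hmt (mySplit_ne_nil t)
      · rw [hmt] at ih
        cases ls0 with
        | nil => simp [J, PySem.Chars.join, List.intercalate] at ih ⊢; simp [ih]
        | cons a b =>
          rw [J_cons (by simp)] at ih ⊢
          simp [ih]

lemma J_append {a b : List (List Char)} (ha : a ≠ []) (hb : b ≠ []) :
    J (a ++ b) = J a ++ '\n' :: J b := by
  induction a with
  | nil => exact absurd rfl ha
  | cons x t ih =>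
    cases t with
    | nil =>
      rw [List.singleton_append, J_cons hb]
      simp [J, PySem.Chars.join, List.intercalate]
    | cons y s =>
      rw [List.cons_append, J_cons (by simp), J_cons (t := y :: s) (by simp), ih (by simp)]
      simp

lemma mySplit_no_nl {l : List Char} (h : '\n' ∉ l) : mySplit l = [l] := by
  induction l with
  | nil => rfl
  | cons c t ih =>
    simp only [mySplit]
    rw [if_neg (by intro hc; exact h (by simp [hc]))]
    rw [ih (by intro ht; exact h (List.mem_cons_of_mem _ ht))]

lemma mySplit_append {l t : List Char} (h : '\n' ∉ l) :
    mySplit (l ++ '\n' :: t) = l :: mySplit t := by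
  induction l with
  | nil => simp [mySplit]
  | cons c u ih =>
    simp only [List.cons_append, mySplit]
    rw [if_neg (by intro hc; exact h (by simp [hc]))]
    rw [ih (by intro ht; exact h (List.mem_cons_of_mem _ ht))]

lemma mySplit_J {ls : List (List Char)} (hg : Good ls) (hne : ls ≠ []) :
    mySplit (J ls) = ls := by
  induction ls with
  | nil => exact absurd rfl hne
  | cons x t ih =>
    cases t with
    | nil =>
      have : J [x] = x := by simp [J, PySem.Chars.join, List.intercalate]
      rw [this, mySplit_no_nl (hg x (by simp))]
    | cons y s =>
      rw [J_cons (by simp), mySplit_append (hg x (by simp)),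
        ih (fun l hl => hg l (List.mem_cons_of_mem _ hl)) (by simp)]

lemma splitOn_go_eq (fuel : Nat) (l cur : List Char) (acc : List (List Char))
    (h : l.length < fuel) :
    PySem.Chars.splitOn.go ['\n'] fuel l cur acc
      = acc.reverse ++ (mySplit l).modifyHead (cur.reverse ++ ·) := by
  induction fuel generalizing l cur acc with
  | zero => omega
  | succ f ih =>
    cases l with
    | nil => simp [PySem.Chars.splitOn.go, mySplit]
    | cons c rest =>
      rw [PySem.Chars.splitOn.go]
      by_cases hc : c = '\n'
      · subst hc
        rw [if_pos (by simp [List.isPrefixOf])]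
        rw [ih _ _ _ (by simp at h ⊢; omega)]
        simp [mySplit]
        exact congrFun List.modifyHead_id _
      · rw [if_neg (by simp [List.isPrefixOf]; exact fun hh => hc hh.symm)]
        rw [ih _ _ _ (by simp at h ⊢; omega)]
        rcases hmt : mySplit rest with _ | ⟨l0, ls0⟩
        · exact absurd hmt (mySplit_ne_nil rest)
        · simp [mySplit, hc, hmt]

lemma splitOn_eq_mySplit (cs : List Char) : PySem.Chars.splitOn cs ['\n'] = mySplit cs := by
  rw [PySem.Chars.splitOn, splitOn_go_eq _ _ _ _ (by omega)]
  rcases hmt : mySplit cs with _ | ⟨l0, ls0⟩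
  · exact absurd hmt (mySplit_ne_nil cs)
  · simp

lemma infix_iff_drop {s m : List Char} : m <:+: s ↔ ∃ j, m <+: s.drop j := by
  rw [← PySem.Chars.isIn_iff_infix, ← PySem.Chars.exists_prefix_drop_iff_isIn]

lemma nl_not_prefix {u v : List Char} (hu : '\n' ∉ u) (hne : u ≠ []) :
    ¬ (['\n'] <+: u ++ v) := by
  intro h
  rcases h with ⟨t, ht⟩
  cases u with
  | nil => exact hne rfl
  | cons c w =>
    simp at ht
    exact hu (List.mem_cons.mpr (Or.inl ht.1))

lemma crossing {m u v : List Char} (hm : '\n' ∉ m) (h : m <+: u ++ '\n' :: v) :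
    m <+: u := by
  by_cases hlen : m.length ≤ u.length
  · rw [List.prefix_iff_eq_take] at h ⊢
    rwa [List.take_append_of_le_length hlen] at h
  · exfalso
    have h1 : u ++ ['\n'] <+: u ++ '\n' :: v := ⟨v, by simp⟩
    have h2 : u ++ ['\n'] <+: m := List.prefix_of_prefix_length_le h1 h (by simp; omega)
    exact hm (h2.subset (by simp))

lemma infix_append_cons {m u v : List Char} (hm : '\n' ∉ m)
    (h : m <:+: u ++ '\n' :: v) : m <:+: u ∨ m <:+: v := by
  rcases infix_iff_drop.1 h with ⟨j, hj⟩
  by_cases hju : j ≤ u.length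
  · rw [List.drop_append_of_le_length hju] at hj
    exact Or.inl (infix_iff_drop.2 ⟨j, crossing hm hj⟩)
  · right
    obtain ⟨k, hk⟩ : ∃ k, j - u.length = k + 1 := ⟨j - u.length - 1, by omega⟩
    have hdrop : (u ++ '\n' :: v).drop j = v.drop k := by
      rw [List.drop_append, List.drop_eq_nil_of_le (by omega), List.nil_append, hk,
        List.drop_succ_cons]
    rw [hdrop] at hj
    exact infix_iff_drop.2 ⟨_, hj⟩

lemma infix_J {m : List Char} {ls : List (List Char)} (hm : '\n' ∉ m) (hne : m ≠ [])
    (hg : Good ls) (h : m <:+: J ls) : ∃ l ∈ ls, m <:+: l := by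
  induction ls with
  | nil =>
    rw [show J [] = [] from rfl, List.infix_nil] at h
    exact absurd h hne
  | cons x t ih =>
    cases t with
    | nil =>
      refine ⟨x, by simp, ?_⟩
      rwa [show J [x] = x by simp [J, PySem.Chars.join, List.intercalate]] at h
    | cons y s =>
      rw [J_cons (by simp)] at h
      rcases infix_append_cons hm h with h' | h'
      · exact ⟨x, by simp, h'⟩
      · rcases ih (fun l hl => hg l (List.mem_cons_of_mem _ hl)) h' with ⟨l, hl, hml⟩
        exact ⟨l, List.mem_cons_of_mem _ hl, hml⟩

lemma find_eq_of {s sub : List Char} {k : Nat} (h1 : sub <+: s.drop k)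
    (h2 : ∀ j < k, ¬ sub <+: s.drop j) : PySem.Chars.find s sub = (k : Int) := by
  have hinf : sub <:+: s := infix_iff_drop.2 ⟨k, h1⟩
  have hnn : 0 ≤ PySem.Chars.find s sub := (PySem.Chars.find_nonneg_iff _ _).2 hinf
  rcases PySem.Chars.find_spec hnn with ⟨hp, hmin⟩
  set f := (PySem.Chars.find s sub).toNat with hf
  rcases lt_trichotomy f k with hlt | heq | hgt
  · exact absurd hp (h2 f hlt)
  · omega
  · exact absurd h1 (hmin k hgt)

lemma find_no {s sub : List Char} (h : ∀ j, ¬ sub <+: s.drop j) :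
    PySem.Chars.find s sub = -1 := by
  rw [PySem.Chars.find_eq_neg_one_iff _ _]
  intro hinf
  rcases infix_iff_drop.1 hinf with ⟨j, hj⟩
  exact h j hj

lemma rfind_go_eq_of {s sub : List Char} {k n : Nat} (hkn : k ≤ n)
    (h1 : sub <+: s.drop k) (h2 : ∀ j, k < j → j ≤ n → ¬ sub <+: s.drop j) :
    PySem.Chars.rfind.go s sub n = (k : Int) := by
  induction n with
  | zero =>
    have hk : k = 0 := by omega
    subst hk
    rw [PySem.Chars.rfind.go, if_pos (List.isPrefixOf_iff_prefix.2 (by simpa using h1))]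
    simp
  | succ j ih =>
    rw [PySem.Chars.rfind.go]
    by_cases hk : k = j + 1
    · subst hk
      rw [if_pos (List.isPrefixOf_iff_prefix.2 h1)]
    · rw [if_neg (by
        intro hp
        exact h2 (j+1) (by omega) le_rfl (List.isPrefixOf_iff_prefix.1 hp))]
      exact ih (by omega) (fun j' hj' hj'' => h2 j' hj' (by omega))

lemma rfind_go_neg {s sub : List Char} (n : Nat) (h : ∀ j ≤ n, ¬ sub <+: s.drop j) :
    PySem.Chars.rfind.go s sub n = -1 := by
  induction n with
  | zero =>
    rw [PySem.Chars.rfind.go, if_neg (by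
      intro hp
      exact h 0 le_rfl (by simpa using List.isPrefixOf_iff_prefix.1 hp))]
  | succ j ih =>
    rw [PySem.Chars.rfind.go, if_neg (by
      intro hp
      exact h (j+1) le_rfl (List.isPrefixOf_iff_prefix.1 hp))]
    exact ih (fun j' hj' => h j' (by omega))

lemma exists_first_split {α : Type} {p : α → Bool} {ls : List α}
    (h : ∃ l ∈ ls, p l = true) :
    ∃ b t r, ls = b ++ t :: r ∧ (∀ x ∈ b, p x = false) ∧ p t = true := by
  induction ls with
  | nil => simp at h
  | cons x t ih =>
    by_cases hx : p x = true
    · exact ⟨[], x, t, by simp, by simp, hx⟩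
    · rcases h with ⟨l, hl, hpl⟩
      rcases List.mem_cons.mp hl with h' | h'
      · exact absurd (h' ▸ hpl) hx
      · rcases ih ⟨l, h', hpl⟩ with ⟨b, tt, r, heq, hb, ht⟩
        exact ⟨x :: b, tt, r, by simp [heq], by
          intro y hy
          rcases List.mem_cons.mp hy with h'' | h''
          · subst h''; simpa using hx
          · exact hb y h'', ht⟩




def secOf : List (List Char) → List (List Char)
  | [] => []
  | l :: r => if PySem.Chars.strip l = [] then [] else l :: secOf r

def specScan : List Char → List (List Char) → Int
  | _, [] => -1
  | x, r0 :: rrest =>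
    if PySem.Chars.strip r0 = [] then (x.length : Int)
    else if rrest = [] then -1 else specScan (x ++ '\n' :: r0) rrest

lemma aFind_shift (l : List (List Char)) (i : Nat) :
    aFind l i = (aFind l 0).map (· + i) := by
  induction l generalizing i with
  | nil => simp [aFind]
  | cons a t ih =>
    simp only [aFind]
    split
    · simp
    · rw [ih (i + 1), ih 1]
      cases aFind t 0 <;> (simp; try omega)

lemma aFind_eq (before : List (List Char)) (tool : List Char) (rest : List (List Char))
    (hb : ∀ x ∈ before, PySem.Chars.isIn "Tool usage".toList x = false)
    (ht : PySem.Chars.isIn "Tool usage".toList tool = true) :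
    aFind (before ++ tool :: rest) 0 = some before.length := by
  induction before with
  | nil => simp only [List.nil_append, aFind, ht, if_true]; rfl
  | cons a t ih =>
    have ha := hb a (by simp)
    simp only [List.cons_append, aFind, ha, Bool.false_eq_true, if_false]
    rw [aFind_shift, ih (fun x hx => hb x (by simp [hx]))]
    simp

lemma aEnd_eq (r : List (List Char)) (k : Nat) : aEnd r k = k + (secOf r).length := by
  induction r generalizing k with
  | nil => simp [aEnd, secOf]
  | cons a t ih =>
    simp only [aEnd, secOf]
    split
    · simp
    · simp [ih]; omega

lemma secOf_take (r : List (List Char)) : r.take (secOf r).length = secOf r := by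
  induction r with
  | nil => simp [secOf]
  | cons a t ih =>
    simp only [secOf]
    split
    · simp
    · simpa using ih

lemma secOf_le (r : List (List Char)) : (secOf r).length ≤ r.length := by
  have := congrArg List.length (secOf_take r)
  simp at this
  omega

lemma secOf_all (r : List (List Char)) (h : (secOf r).length = r.length) : secOf r = r := by
  have := secOf_take r
  rw [h, List.take_length] at this
  exact this.symm

lemma specScan_neg (rest : List (List Char)) (x : List Char)
    (h : (secOf rest).length = rest.length) : specScan x rest = -1 := by
  induction rest generalizing x with
  | nil => rfl
  | cons r0 rrest ih =>
    simp only [specScan, secOf] at h ⊢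
    split at h
    · simp at h
    · rename_i hs
      rw [if_neg hs]
      cases rrest with
      | nil => simp
      | cons a b =>
        rw [if_neg (by simp)]
        exact ih _ (by simpa using h)

lemma specScan_val (rest : List (List Char)) (x : List Char)
    (h : (secOf rest).length ≠ rest.length) :
    specScan x rest =
      ((x.length + (if secOf rest = [] then 0 else 1 + (J (secOf rest)).length) : Nat) : Int) := by
  induction rest generalizing x with
  | nil => simp [secOf] at h
  | cons r0 rrest ih =>
    simp only [specScan, secOf] at h ⊢
    by_cases hs : PySem.Chars.strip r0 = []
    · simp [hs]
    · simp only [if_neg hs] at h ⊢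
      rw [if_neg (show r0 :: secOf rrest ≠ [] by simp)]
      cases rrest with
      | nil => simp [secOf] at h
      | cons a b =>
        rw [if_neg (by simp), ih _ (by simpa using h)]
        by_cases hh : secOf (a :: b) = []
        · rw [hh]
          simp [J, PySem.Chars.join, List.intercalate]
          omega
        · rw [if_neg hh, J_cons hh]
          simp [List.length_append]
          omega

lemma nl_not_prefix0 {u : List Char} (hu : '\n' ∉ u) : ¬ (['\n'] <+: u) := by
  intro h
  rcases h with ⟨t, ht⟩
  cases u with
  | nil => simp at ht
  | cons c w =>
    simp at ht
    exact hu (List.mem_cons.mpr (Or.inl ht.1))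

lemma find_nl_none {r : List Char} (hr : '\n' ∉ r) :
    PySem.Chars.find r ['\n'] = -1 := by
  refine find_no (fun j => nl_not_prefix0 ?_)
  intro h
  exact hr ((List.drop_subset _ _) h)

lemma find_nl_cons {r0 : List Char} {v : List Char} (hr : '\n' ∉ r0) :
    PySem.Chars.find (r0 ++ '\n' :: v) ['\n'] = (r0.length : Int) := by
  refine find_eq_of ?_ ?_
  · rw [show (r0 ++ '\n' :: v).drop r0.length = '\n' :: v by
      simpa using List.drop_left r0 ('\n' :: v)]
    exact ⟨v, rfl⟩
  · intro j hj
    rw [List.drop_append_of_le_length (by omega)]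
    refine nl_not_prefix ?_ ?_
    · intro h; exact hr ((List.drop_subset _ _) h)
    · rw [ne_eq, List.drop_eq_nil_iff]; omega

lemma bScan_eq_specScan (rest : List (List Char)) (x : List Char)
    (hne : rest ≠ []) (hg : Good rest) :
    bScan (x ++ '\n' :: J rest) x.length = specScan x rest := by
  induction rest generalizing x with
  | nil => exact absurd rfl hne
  | cons r0 rrest ih =>
    set cs := x ++ '\n' :: J (r0 :: rrest) with hcs
    have hlen : cs.length = x.length + 1 + (J (r0 :: rrest)).length := by
      simp [hcs]; omega
    have hdrop : cs.drop (x.length + 1) = J (r0 :: rrest) := by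
      rw [show cs = (x ++ ['\n']) ++ J (r0 :: rrest) by simp [hcs],
        show x.length + 1 = (x ++ ['\n']).length by simp, List.drop_left]
    have hff : PySem.Chars.findFrom cs "\n".toList ((x.length : Int) + 1) none
        = (if PySem.Chars.find (cs.drop (x.length + 1)) ['\n'] = -1 then -1
           else ((x.length + 1 : Nat) : Int) + PySem.Chars.find (cs.drop (x.length + 1)) ['\n']) := by
      have := PySem.Chars.findFrom_natCast cs ['\n'] (x.length + 1) (by omega)
      rw [show ((x.length : Int) + 1) = ((x.length + 1 : Nat) : Int) by push_cast; ring]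
      exact this
    cases rrest with
    | nil =>
      have hJ : J [r0] = r0 := by simp [J, PySem.Chars.join, List.intercalate]
      have hnE : PySem.Chars.findFrom cs "\n".toList ((x.length : Int) + 1) none = -1 := by
        rw [hff, hdrop, hJ, find_nl_none (hg r0 (by simp)), if_pos rfl]
      rw [bScan, hnE, if_pos rfl, hdrop, hJ, specScan]
      split <;> rfl
    | cons a b =>
      have hJc : J (r0 :: a :: b) = r0 ++ '\n' :: J (a :: b) := J_cons (by simp)
      have hfind : PySem.Chars.find (cs.drop (x.length + 1)) ['\n'] = (r0.length : Int) := by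
        rw [hdrop, hJc]
        exact find_nl_cons (hg r0 (by simp))
      have hnE : PySem.Chars.findFrom cs "\n".toList ((x.length : Int) + 1) none
          = ((x.length + 1 + r0.length : Nat) : Int) := by
        rw [hff, hfind, if_neg (show (r0.length : Int) ≠ -1 by omega)]
        push_cast; ring
      rw [bScan, hnE, if_neg (by omega)]
      have htonat : (((x.length + 1 + r0.length : Nat) : Int)).toNat
          = x.length + 1 + r0.length := by omega
      have htake : cs.take (x.length + 1 + r0.length) = x ++ '\n' :: r0 := by
        rw [show cs = (x ++ '\n' :: r0) ++ ('\n' :: J (a :: b)) by simp [hcs, hJc],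
          show x.length + 1 + r0.length = (x ++ '\n' :: r0).length by simp; omega, List.take_left]
      have hnxt : (cs.take (((x.length + 1 + r0.length : Nat) : Int)).toNat).drop (x.length + 1) = r0 := by
        rw [htonat, htake, show x ++ '\n' :: r0 = (x ++ ['\n']) ++ r0 by simp,
          show x.length + 1 = (x ++ ['\n']).length by simp, List.drop_left]
      rw [specScan]
      by_cases hs : PySem.Chars.strip r0 = []
      · rw [dif_pos (by rw [hnxt]; exact hs), if_pos hs]
      · rw [dif_neg (by rw [hnxt]; exact hs), if_neg hs, if_neg (by simp)]
        have hx' : cs = (x ++ '\n' :: r0) ++ '\n' :: J (a :: b) := by simp [hcs, hJc]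
        rw [htonat, show x.length + 1 + r0.length = (x ++ '\n' :: r0).length by simp; omega, hx']
        exact ih (x ++ '\n' :: r0) (by simp) (fun l hl => hg l (List.mem_cons_of_mem _ hl))

def Pfx (before : List (List Char)) : List Char :=
  if before = [] then [] else J before ++ ['\n']

lemma J_P (before X : List (List Char)) (hX : X ≠ []) :
    J (before ++ X) = Pfx before ++ J X := by
  by_cases hb : before = []
  · simp [hb, Pfx]
  · rw [Pfx, if_neg hb, J_append hb hX]
    simp

lemma find_first {tool v m : List Char} (hm : '\n' ∉ m)
    (hocc : m <:+: tool) :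
    PySem.Chars.find (tool ++ '\n' :: v) m = PySem.Chars.find tool m := by
  have hnn : 0 ≤ PySem.Chars.find tool m := (PySem.Chars.find_nonneg_iff _ _).2 hocc
  rcases PySem.Chars.find_spec hnn with ⟨hp, hmin⟩
  set k := (PySem.Chars.find tool m).toNat with hk
  have hkle : k ≤ tool.length := by
    have := PySem.Chars.find_le_length (s := tool) (sub := m)
    omega
  have : PySem.Chars.find (tool ++ '\n' :: v) m = (k : Int) := by
    refine find_eq_of ?_ ?_
    · rw [List.drop_append_of_le_length hkle]
      exact hp.trans (List.prefix_append _ _)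
    · intro j hj hpre
      rw [List.drop_append_of_le_length (by omega)] at hpre
      exact hmin j hj (crossing hm hpre)
  rw [this, hk, Int.toNat_of_nonneg hnn]

lemma find_step {l t m : List Char} (hm : '\n' ∉ m) (hl : '\n' ∉ l)
    (hnl : ¬ m <:+: l) (ht : 0 ≤ PySem.Chars.find t m) :
    PySem.Chars.find (l ++ '\n' :: t) m = ((l.length + 1 : Nat) : Int) + PySem.Chars.find t m := by
  rcases PySem.Chars.find_spec ht with ⟨hp, hmin⟩
  set q := (PySem.Chars.find t m).toNat with hq
  have : PySem.Chars.find (l ++ '\n' :: t) m = ((l.length + 1 + q : Nat) : Int) := by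
    refine find_eq_of ?_ ?_
    · rw [show (l ++ '\n' :: t).drop (l.length + 1 + q) = t.drop q by
        rw [show l.length + 1 + q = (l ++ ['\n']).length + q by simp,
          show l ++ '\n' :: t = (l ++ ['\n']) ++ t by simp, List.drop_append, List.drop_eq_nil_of_le (by simp), List.nil_append]
        congr 1
        simp]
      exact hp
    · intro j hj hpre
      by_cases hjl : j ≤ l.length
      · rw [List.drop_append_of_le_length hjl] at hpre
        have := crossing hm hpre
        exact hnl (infix_iff_drop.2 ⟨j, this⟩)
      · have hdrop : (l ++ '\n' :: t).drop j = t.drop (j - l.length - 1) := by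
          rw [show l ++ '\n' :: t = (l ++ ['\n']) ++ t by simp, List.drop_append,
            List.drop_eq_nil_of_le (by simp; omega), List.nil_append]
          congr 1
          simp
          omega
        rw [hdrop] at hpre
        exact hmin _ (by omega) hpre
  rw [this, hq]
  push_cast [Int.toNat_of_nonneg ht]
  ring

lemma find_J_marker (before : List (List Char)) (tool : List Char)
    (rest : List (List Char)) (m : List Char) (hm : '\n' ∉ m)
    (hb : ∀ l ∈ before, ¬ m <:+: l) (ht : m <:+: tool)
    (hG : Good (before ++ tool :: rest)) :
    PySem.Chars.find (J (before ++ tool :: rest)) m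
      = ((Pfx before).length : Int) + PySem.Chars.find tool m := by
  induction before with
  | nil =>
    rw [show ((Pfx []).length : Int) = 0 by simp [Pfx], zero_add, List.nil_append]
    cases rest with
    | nil => simp [J, PySem.Chars.join, List.intercalate]
    | cons a b =>
      rw [J_cons (by simp)]
      exact find_first hm ht
  | cons l before' ih =>
    have hlG : '\n' ∉ l := hG l (by simp)
    have hstep : J ((l :: before') ++ tool :: rest) = l ++ '\n' :: J (before' ++ tool :: rest) := by
      rw [List.cons_append, J_cons (by simp)]
    rw [hstep, find_step hm hlG (hb l (by simp)) ?pos]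
    case pos =>
      rw [ih (fun x hx => hb x (by simp [hx])) (fun x hx => hG x (by right; exact hx))]
      have : 0 ≤ PySem.Chars.find tool m := (PySem.Chars.find_nonneg_iff _ _).2 ht
      positivity
    rw [ih (fun x hx => hb x (by simp [hx])) (fun x hx => hG x (by right; exact hx))]
    have hP : (Pfx (l :: before')).length = l.length + 1 + (Pfx before').length := by
      by_cases hb' : before' = []
      · simp [hb', Pfx, J, PySem.Chars.join, List.intercalate]
      · rw [Pfx, if_neg (by simp), Pfx, if_neg hb', J_cons hb']
        simp
        omega
    rw [hP]
    push_cast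
    ring

lemma rfind_prefix (before : List (List Char)) (tool : List Char) (k : Nat)
    (hG : Good before) (htool : '\n' ∉ tool) :
    PySem.Chars.rfind (Pfx before ++ tool.take k) ['\n'] = ((Pfx before).length : Int) - 1 := by
  by_cases hb : before = []
  · rw [hb, Pfx, if_pos rfl, List.nil_append]
    rw [PySem.Chars.rfind]
    rw [rfind_go_neg _ (fun j hj => nl_not_prefix0 (fun hmem =>
      htool ((List.take_subset k tool) ((List.drop_subset _ _) hmem))))]
    simp
  · rw [Pfx, if_neg hb]
    have hli : (J before ++ ['\n']) ++ tool.take k = J before ++ '\n' :: tool.take k := by simp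
    rw [hli, PySem.Chars.rfind]
    rw [rfind_go_eq_of (k := (J before).length) (by simp)
      (by rw [show (J before ++ '\n' :: tool.take k).drop (J before).length = '\n' :: tool.take k
            from by simpa using List.drop_left (J before) ('\n' :: tool.take k)]
          exact ⟨tool.take k, rfl⟩)
      ?max]
    case max =>
      intro j hj hjle hpre
      have hdrop : (J before ++ '\n' :: tool.take k).drop j = (tool.take k).drop (j - (J before).length - 1) := by
        rw [show J before ++ '\n' :: tool.take k = (J before ++ ['\n']) ++ tool.take k by simp,
          List.drop_append, List.drop_eq_nil_of_le (by simp; omega), List.nil_append]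
        congr 1
        simp
        omega
      rw [hdrop] at hpre
      exact nl_not_prefix0 (fun hmem =>
        htool ((List.take_subset k tool) ((List.drop_subset _ _) hmem))) hpre
    simp

-- evaluation of B's start index:  text.rfind("\n", 0, pos) + 1 = len(Pfx before)
lemma start_eq (before : List (List Char)) (tool : List Char) (rest : List (List Char))
    (q : Nat) (hq : q ≤ tool.length) (hGb : Good before) (htool : '\n' ∉ tool) :
    (PySem.Chars.rfindFrom (Pfx before ++ J (tool :: rest)) "\n".toList 0
        (some (((Pfx before).length + q : Nat) : Int)) + 1).toNat = (Pfx before).length := by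
  have hJts : ∃ S, J (tool :: rest) = tool ++ S := by
    cases rest with
    | nil => exact ⟨[], by simp [J, PySem.Chars.join, List.intercalate]⟩
    | cons a b => exact ⟨'\n' :: J (a :: b), J_cons (by simp)⟩
  obtain ⟨S, hS⟩ := hJts
  set cs := Pfx before ++ J (tool :: rest) with hcs
  have hlen : (Pfx before).length + q ≤ cs.length := by
    simp only [hcs, hS, List.length_append]
    omega
  have htk : cs.take ((Pfx before).length + q) = Pfx before ++ tool.take q := by
    rw [hcs, List.take_append, List.take_of_length_le (by omega),
      show (Pfx before).length + q - (Pfx before).length = q by omega, hS,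
      List.take_append_of_le_length hq]
  rw [show ("\n".toList : List Char) = ['\n'] from rfl]
  simp only [PySem.Chars.rfindFrom]
  rw [if_neg (show ¬((cs.length : Int) < (((Pfx before).length + q : Nat) : Int)) from by
    push_cast; omega)]
  rw [if_neg (show ¬((((Pfx before).length + q : Nat) : Int) < 0) from by push_cast; omega)]
  rw [if_neg (show ¬((0 : Int) < 0) from by omega)]
  rw [if_neg (show ¬((((Pfx before).length + q : Nat) : Int) < (0 : Int)) from by push_cast; omega)]
  rw [show (Int.toNat 0) = 0 from rfl, List.drop_zero,
    show ((((Pfx before).length + q : Nat) : Int)).toNat = (Pfx before).length + q by omega, htk,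
    rfind_prefix before tool q hGb htool]
  by_cases hb : before = []
  · rw [if_pos (by simp [Pfx, hb])]
    simp [Pfx, hb]
  · have hP1 : 1 ≤ (Pfx before).length := by
      rw [Pfx, if_neg hb]
      simp
    rw [if_neg (by omega)]
    omega

lemma wrap_eq (before mid rdrop : List (List Char)) (hmid : mid ≠ []) :
    J (before ++ ["```".toList] ++ mid ++ ["```".toList] ++ rdrop)
      = Pfx before ++ "```\n".toList ++ J mid ++ "\n```".toList
        ++ (if rdrop = [] then [] else '\n' :: J rdrop) := by
  have hL : before ++ ["```".toList] ++ mid ++ ["```".toList] ++ rdrop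
      = before ++ ("```".toList :: (mid ++ "```".toList :: rdrop)) := by simp
  rw [hL, J_P _ _ (by simp), J_cons (by simp)]
  cases rdrop with
  | nil =>
    rw [if_pos rfl, List.append_nil, J_append hmid (by simp),
      show J ["```".toList] = "```".toList by simp [J, PySem.Chars.join, List.intercalate]]
    simp [show ("```\n".toList : List Char) = "```".toList ++ ['\n'] from rfl,
      show ("\n```".toList : List Char) = '\n' :: "```".toList from rfl]
  | cons r rs =>
    rw [if_neg (by simp), J_append hmid (by simp), J_cons (by simp)]
    simp [show ("```\n".toList : List Char) = "```".toList ++ ['\n'] from rfl,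
      show ("\n```".toList : List Char) = '\n' :: "```".toList from rfl]

-- ===== VERDICT (by name: the statement is the Claim_ definition above) =====
theorem ensure_tool_usage_in_code_block_py_spec : Claim_equal_ensure_tool_usage_in_code_block_py := by
  intro text _
  unfold Spec_ensure_tool_usage_in_code_block_py
  unfold ensure_tool_usage_in_code_block_py ensure_tool_usage_in_code_block_py_alt
  dsimp only
  set cs := text.toList with hcs0
  set m : List Char := "Tool usage".toList with hmdef
  by_cases hf : PySem.Chars.find cs m = -1
  · rw [if_pos (by
      rw [PySem.Str.isIn_eq]
      simp [PySem.Chars.isIn, ← hmdef, ← hcs0, hf]), if_pos hf]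
  · -- the marker occurs; set up the line decomposition
    rw [if_neg hf]
    have hmnl : '\n' ∉ m := by decide
    have hmne : m ≠ [] := by decide
    have hisin : PySem.Chars.isIn m cs = true := by simp [PySem.Chars.isIn, hf]
    rw [if_neg (by
      rw [PySem.Str.isIn_eq]
      simp [← hmdef, ← hcs0, hisin])]
    have hsplitA : (PySem.Chars.split? cs "\n".toList).getD [] = mySplit cs := by
      rw [show ("\n".toList : List Char) = ['\n'] from rfl, PySem.Chars.split?]
      simp [splitOn_eq_mySplit]
    have hinf : m <:+: cs := (PySem.Chars.find_ne_neg_one_iff _ _).1 hf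
    have hcsJ : J (mySplit cs) = cs := join_mySplit cs
    have hGall : Good (mySplit cs) := good_mySplit cs
    obtain ⟨l0, hl0mem, hl0⟩ := infix_J hmnl hmne hGall (by rw [hcsJ]; exact hinf)
    obtain ⟨before, tool, rest, hdec, hbf, htf⟩ :=
      exists_first_split (p := fun l => PySem.Chars.isIn m l)
        ⟨l0, hl0mem, (PySem.Chars.isIn_iff_infix _ _).2 hl0⟩
    have htool_inf : m <:+: tool := (PySem.Chars.isIn_iff_infix _ _).1 htf
    have hb_not : ∀ l ∈ before, ¬ m <:+: l := fun l hl hc => by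
      have := hbf l hl
      rw [(PySem.Chars.isIn_iff_infix m l).2 hc] at this
      exact absurd this (by simp)
    have hG : Good (before ++ tool :: rest) := by rw [← hdec]; exact hGall
    have hGb : Good before := fun l hl => hG l (by simp [hl])
    have hGtool : '\n' ∉ tool := hG tool (by simp)
    have hGrest : Good rest := fun l hl => hG l (by simp [hl])
    have hcsJ' : cs = J (before ++ tool :: rest) := by rw [← hcsJ, hdec]
    set P := Pfx before with hPdef
    have hPJ : cs = P ++ J (tool :: rest) := by rw [hcsJ', J_P _ _ (by simp)]
    have hq0 : 0 ≤ PySem.Chars.find tool m := (PySem.Chars.find_nonneg_iff _ _).2 htool_inf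
    set q := (PySem.Chars.find tool m).toNat with hqdef
    have hqle : q ≤ tool.length := by
      have := PySem.Chars.find_le_length (s := tool) (sub := m)
      omega
    have hpos : PySem.Chars.find cs m = ((P.length + q : Nat) : Int) := by
      have hcast : ((P.length + q : Nat) : Int) = (P.length : Int) + (q : Int) := by push_cast; ring
      rw [hcsJ', find_J_marker before tool rest m hmnl hb_not htool_inf hG, hcast, hqdef,
        Int.toNat_of_nonneg hq0, hPdef]
    -- B's start = P.length
    have hstart : (PySem.Chars.rfindFrom cs "\n".toList 0 (some (PySem.Chars.find cs m)) + 1).toNat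
        = P.length := by
      rw [hpos, hPJ]
      exact start_eq before tool rest q hqle hGb hGtool
    rw [hstart]
    -- parity lists agree
    have htkP : cs.take P.length = P := by
      rw [hPJ, List.take_append, List.take_of_length_le (le_refl _), Nat.sub_self,
        List.take_zero, List.append_nil]
    have hpar : (PySem.Chars.splitOn (cs.take P.length) "\n".toList).dropLast = before := by
      rw [show ("\n".toList : List Char) = ['\n'] from rfl, htkP, hPdef]
      by_cases hb : before = []
      · simp [hb, Pfx, splitOn_eq_mySplit, mySplit]
      · rw [Pfx, if_neg hb,
          show J before ++ ['\n'] = J (before ++ [[]]) by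
            rw [J_append hb (by simp)]; simp [J, PySem.Chars.join, List.intercalate],
          splitOn_eq_mySplit,
          mySplit_J (by
            intro l hl
            rcases List.mem_append.mp hl with h | h
            · exact hGb l h
            · simp at h; simp [h]) (by simp)]
        simp
    rw [hpar]
    -- A side: the line search finds the tool line
    rw [hsplitA]
    have haf : aFind (mySplit cs) 0 = some before.length := by
      rw [hdec]; exact aFind_eq _ _ _ hbf htf
    split
    · rename_i heq
      rw [haf] at heq
      exact absurd heq (by simp)
    · rename_i i heq
      rw [haf] at heq
      injection heq with hieq
      subst hieq
      -- both parity folds are over `before`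
      rw [hdec, List.take_left]
      set par := before.foldl (fun b l => if PySem.Chars.isIn "```".toList l then !b else b) false with hpardef
      by_cases hp : par = true
      · rw [if_pos hp, if_pos hp]
      · rw [if_neg hp, if_neg hp]
        -- A-side: reduce the line-level pieces
        have hsplitL : before ++ tool :: rest = (before ++ [tool]) ++ rest := by simp
        have hdropA1 : (before ++ tool :: rest).drop (before.length + 1) = rest := by
          rw [hsplitL, show before.length + 1 = (before ++ [tool]).length by simp, List.drop_left]
        have hdropA0 : (before ++ tool :: rest).drop before.length = tool :: rest := by
          simpa using List.drop_left before (tool :: rest)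
        rw [hdropA1, aEnd_eq]
        set sec := secOf rest with hsecdef
        rw [show before.length + 1 + sec.length - before.length = sec.length + 1 by omega]
        rw [hdropA0, List.take_succ_cons, hsecdef, secOf_take, ← hsecdef]
        have hdropE : (before ++ tool :: rest).drop (before.length + 1 + sec.length)
            = rest.drop sec.length := by
          rw [hsplitL, List.drop_append, List.drop_eq_nil_of_le (by simp; try omega), List.nil_append]
          congr 1
          simp
          try omega
        rw [hdropE]
        have hJfun : PySem.Chars.join "\n".toList = J := by funext l; rfl
        rw [hJfun, wrap_eq before (tool :: sec) (rest.drop sec.length) (by simp), ← hPdef]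
        -- B-side: the newline search from start
        have hlenP : P.length ≤ cs.length := by rw [hPJ]; simp
        have hff0 : PySem.Chars.findFrom cs "\n".toList (↑P.length) none
            = if PySem.Chars.find (cs.drop P.length) ['\n'] = -1 then -1
              else ((P.length : Nat) : Int) + PySem.Chars.find (cs.drop P.length) ['\n'] := by
          rw [show ("\n".toList : List Char) = ['\n'] from rfl]
          exact PySem.Chars.findFrom_natCast cs ['\n'] P.length hlenP
        have hdropP : cs.drop P.length = J (tool :: rest) := by
          rw [hPJ]
          exact List.drop_left
        cases rest with
        | nil =>
          have hsec : sec = [] := by rw [hsecdef]; rfl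
          have hJt : J [tool] = tool := by simp [J, PySem.Chars.join, List.intercalate]
          have hfindnil : PySem.Chars.find (cs.drop P.length) ['\n'] = -1 := by
            rw [hdropP, hJt]
            exact find_nl_none hGtool
          rw [hff0, hfindnil, if_pos rfl, if_pos (show ((-1 : Int)) = -1 from rfl),
            if_pos (show ((-1 : Int)) = -1 from rfl)]
          have hcseq : cs = P ++ tool := by rw [hPJ, hJt]
          rw [htkP, hdropP, hJt, List.drop_length,
            show cs.length - P.length = tool.length by rw [hcseq]; simp, List.take_length,
            hsec]
          simp [hJt]
        | cons a b =>
          have hJrest : J (tool :: a :: b) = tool ++ '\n' :: J (a :: b) := J_cons (by simp)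
          have hfind : PySem.Chars.find (cs.drop P.length) ['\n'] = (tool.length : Int) := by
            rw [hdropP, hJrest]
            exact find_nl_cons hGtool
          have he0 : PySem.Chars.findFrom cs "\n".toList (↑P.length) none
              = ((P.length + tool.length : Nat) : Int) := by
            rw [hff0, hfind, if_neg (by omega)]
            push_cast
            ring
          rw [he0, if_neg (show ¬(((P.length + tool.length : Nat) : Int) = -1) by omega)]
          have hcseq2 : cs = (P ++ tool) ++ '\n' :: J (a :: b) := by
            rw [hPJ, hJrest]
            simp
          have hbs : bScan cs (((P.length + tool.length : Nat) : Int)).toNat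
              = specScan (P ++ tool) (a :: b) := by
            rw [show (((P.length + tool.length : Nat) : Int)).toNat = (P ++ tool).length by
                simp
                omega,
              hcseq2]
            exact bScan_eq_specScan (a :: b) (P ++ tool) (by simp) hGrest
          rw [hbs]
          by_cases hall : (secOf (a :: b)).length = (a :: b).length
          · rw [specScan_neg _ _ hall, if_pos (show ((-1 : Int)) = -1 from rfl)]
            have hsecall : sec = a :: b := by rw [hsecdef]; exact secOf_all _ hall
            rw [htkP, hdropP,
              show cs.length - P.length = (J (tool :: a :: b)).length by rw [hPJ]; simp,
              List.take_length, List.drop_length, hsecall, List.drop_length]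
            simp
          · have hJmidlen : (J (tool :: sec)).length
                = tool.length + (if secOf (a :: b) = [] then 0 else 1 + (J (secOf (a :: b))).length) := by
              rw [hsecdef]
              by_cases hs : secOf (a :: b) = []
              · simp [hs, J, PySem.Chars.join, List.intercalate]
              · rw [if_neg hs, J_cons hs]
                simp
                omega
            rw [specScan_val _ _ hall,
              if_neg (show ¬((((P ++ tool).length + (if secOf (a :: b) = [] then 0 else 1 + (J (secOf (a :: b))).length) : Nat) : Int) = -1) by omega),
              Int.toNat_natCast]
            have hv : (P ++ tool).length + (if secOf (a :: b) = [] then 0 else 1 + (J (secOf (a :: b))).length)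
                = P.length + (J (tool :: sec)).length := by
              rw [hJmidlen]
              simp
              omega
            rw [hv]
            have hsp : a :: b = sec ++ (a :: b).drop sec.length := by
              conv_lhs => rw [← List.take_append_drop sec.length (a :: b)]
              rw [hsecdef, secOf_take]
            have hrd : (a :: b).drop sec.length ≠ [] := by
              rw [ne_eq, List.drop_eq_nil_iff]
              have hle := secOf_le (a :: b)
              rw [← hsecdef] at hall hle
              simp only [List.length_cons] at *
              omega
            have hdecomp : J (tool :: a :: b) = J (tool :: sec) ++ '\n' :: J ((a :: b).drop sec.length) := by
              conv_lhs => rw [show tool :: a :: b = (tool :: sec) ++ (a :: b).drop sec.length by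
                rw [List.cons_append, ← hsp]]
              exact J_append (by simp) hrd
            have hcseq3 : cs = (P ++ J (tool :: sec)) ++ '\n' :: J ((a :: b).drop sec.length) := by
              rw [hPJ, hdecomp]
              simp
            rw [show P.length + (J (tool :: sec)).length - P.length = (J (tool :: sec)).length by omega]
            rw [htkP, hdropP, hdecomp, List.take_left]
            rw [if_neg hrd, show P.length + (J (tool :: sec)).length = (P ++ J (tool :: sec)).length by
              simp, hcseq3, List.drop_left]
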